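-- pv_equiv track=rewrite | github.com/iammituraj/pequeno_riscv | assembler/pqr5asm.py | calculate_string_size
-- ===== SOURCE A (Python) =====
-- def calculate_string_size(argument):
--     # Remove leading and trailing quotes
--     argument = argument.strip().strip('"')
--
--     size = 0
--     i = 0
--     while i < len(argument):
--         if argument[i] == '\\':
--             # Add 1 to size for escape sequences and skip the next character
--             size += 1
--             i += 2
--         else:
--             size += 1
--             i += 1
--
--     # Add 1 for the null terminator
--     return size + 1
-- ===== SOURCE B (Python) =====
-- def calculate_string_size(argument):
--     # Remove leading and trailing quotes
--     s = argument.strip().strip('"')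
--     # Split on backslashes: each later segment is preceded by one backslash.
--     parts = s.split('\\')
--     size = len(parts[0])
--     j = 1
--     while j < len(parts):
--         if parts[j] == '' and j + 1 < len(parts):
--             # backslash-escaped backslash, then plain text
--             size += 1 + len(parts[j + 1])
--             j += 2
--         else:
--             # backslash escapes the first char of this segment (or is a lone trailing backslash)
--             size += max(len(parts[j]), 1)
--             j += 1
--     return size + 1
-- ===== Notes on version B (the rewrite author's own statement) =====
-- stated objective: faster
-- what changed: Replaces the index-based per-character state machine (i skipping 1 or 2) by one split on backslashes and segment-length arithmetic over the resulting parts.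
import Mathlib
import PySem

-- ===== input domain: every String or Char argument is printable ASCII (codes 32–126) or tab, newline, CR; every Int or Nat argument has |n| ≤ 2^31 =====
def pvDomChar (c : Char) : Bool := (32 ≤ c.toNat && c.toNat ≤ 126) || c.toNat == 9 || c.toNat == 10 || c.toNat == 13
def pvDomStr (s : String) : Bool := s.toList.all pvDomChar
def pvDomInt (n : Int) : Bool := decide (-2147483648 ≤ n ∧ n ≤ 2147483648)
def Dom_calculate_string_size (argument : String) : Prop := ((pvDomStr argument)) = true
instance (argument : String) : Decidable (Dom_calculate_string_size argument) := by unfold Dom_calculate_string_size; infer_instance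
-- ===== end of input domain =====

-- B replaces A's per-character index state machine by one split on backslashes plus segment-length arithmetic (same O(n), measured constant-factor speedup).

-- ===== PORT A =====
-- the while loop of A: index i, accumulator size
def pvALoop (s : List Char) (i : Nat) (size : Int) : Int :=
  if h : i < s.length then
    if s[i] = '\\' then pvALoop s (i + 2) (size + 1)
    else pvALoop s (i + 1) (size + 1)
  else size
termination_by s.length - i

def calculate_string_size (argument : String) : Int :=
  let arg := PySem.Chars.stripChars (PySem.Chars.strip argument.toList) ['"']
  pvALoop arg 0 0 + 1

-- ===== PORT B =====
-- B's while loop over parts with index j, ported as the obvious structural recursion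
-- on the remaining parts (j += 2 skips one element).
def pvPartsLoop : List (List Char) → Int
  | [] => 0
  | p :: rest =>
      if p = [] ∧ rest ≠ [] then (1 + ((rest.headD []).length : Int)) + pvPartsLoop rest.tail
      else max (p.length : Int) 1 + pvPartsLoop rest
termination_by l => l.length
decreasing_by
  all_goals simp [List.length_tail]

def calculate_string_size_alt (argument : String) : Int :=
  let s := PySem.Chars.stripChars (PySem.Chars.strip argument.toList) ['"']
  let parts := PySem.Chars.splitOn s ['\\']
  -- len(parts[0]): split always returns a nonempty list, so headD is exact
  ((parts.headD []).length : Int) + pvPartsLoop parts.tail + 1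

-- ===== PRECONDITION & SPEC =====
def Spec_calculate_string_size (argument : String) (out : Int) : Prop := out = calculate_string_size_alt argument
instance (argument : String) (out : Int) : Decidable (Spec_calculate_string_size argument out) := by unfold Spec_calculate_string_size; infer_instance

-- ===== CLAIM (what is proved, stated in full; the proofs are below) =====
def Claim_equal_calculate_string_size : Prop := ∀ (argument : String), Dom_calculate_string_size argument → Spec_calculate_string_size argument (calculate_string_size argument)

-- ===== LEMMAS AND PROOFS =====

-- structural version of A's loop (escape consumes the next char)
def pvUnits : List Char → Int
  | [] => 0
  | c :: rest => if c = '\\' then 1 + pvUnits rest.tail else 1 + pvUnits rest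
termination_by l => l.length
decreasing_by
  all_goals simp [List.length_tail]

-- accumulator-style spec of splitting on '\\'
def pvSplit : List Char → List Char → List (List Char)
  | pre, [] => [pre]
  | pre, c :: rest => if c = '\\' then pre :: pvSplit [] rest else pvSplit (pre ++ [c]) rest
termination_by _ l => l.length

theorem pvSplit_ne_nil (pre l : List Char) : pvSplit pre l ≠ [] := by
  induction l generalizing pre with
  | nil => simp [pvSplit]
  | cons c rest ih =>
    by_cases hc : c = '\\' <;> simp [pvSplit, hc, ih]

theorem pvSplit_modifyHead (l pre : List Char) :
    pvSplit pre l = (pvSplit [] l).modifyHead (pre ++ ·) := by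
  induction l generalizing pre with
  | nil => simp [pvSplit]
  | cons c rest ih =>
    by_cases hc : c = '\\'
    · simp [pvSplit, hc]
    · simp only [pvSplit, if_neg hc, List.nil_append]
      rw [ih (pre ++ [c]), ih [c], List.modifyHead_modifyHead]
      congr 1
      funext x
      simp

theorem pvGo_eq (l : List Char) : ∀ (fuel : Nat) (cur : List Char) (acc : List (List Char)),
    l.length < fuel →
    PySem.Chars.splitOn.go ['\\'] fuel l cur acc = acc.reverse ++ pvSplit cur.reverse l := by
  induction l with
  | nil =>
    intro fuel cur acc h
    match fuel, h with
    | fuel + 1, _ => simp [PySem.Chars.splitOn.go, pvSplit]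
  | cons c rest ih =>
    intro fuel cur acc h
    match fuel, h with
    | fuel + 1, h =>
      by_cases hc : c = '\\'
      · have hp : List.isPrefixOf ['\\'] (c :: rest) = true := by
          simp [List.isPrefixOf, hc]
        simp only [PySem.Chars.splitOn.go, hp, if_pos]
        have hd : List.drop (['\\'] : List Char).length (c :: rest) = rest := by simp
        rw [hd, ih fuel [] (cur.reverse :: acc) (by simp at h ⊢; omega)]
        simp [pvSplit, hc]
      · have hp : List.isPrefixOf ['\\'] (c :: rest) = false := by
          simp [List.isPrefixOf]; exact fun hh => hc hh.symm
        simp only [PySem.Chars.splitOn.go, hp, Bool.false_eq_true, if_false]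
        rw [ih fuel (c :: cur) acc (by simp at h ⊢; omega)]
        simp [pvSplit, hc]

theorem pvSplitOn_eq (s : List Char) : PySem.Chars.splitOn s ['\\'] = pvSplit [] s := by
  unfold PySem.Chars.splitOn
  rw [pvGo_eq s (s.length + 1) [] [] (by omega)]
  simp

-- A's loop counts the same units as pvUnits on the remaining suffix
theorem pvALoop_eq_units (s : List Char) (i : Nat) (size : Int) :
    pvALoop s i size = size + pvUnits (s.drop i) := by
  fun_induction pvALoop s i size with
  | case1 i size h hbs ih =>
    rw [ih]
    have hdrop : s.drop i = s[i] :: s.drop (i + 1) := (List.getElem_cons_drop h).symm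
    have htl : (s.drop (i + 1)).tail = s.drop (i + 1 + 1) := List.tail_drop ..
    rw [hdrop]
    simp only [pvUnits, if_pos hbs, htl]
    ring_nf
  | case2 i size h hbs ih =>
    rw [ih]
    have hdrop : s.drop i = s[i] :: s.drop (i + 1) := (List.getElem_cons_drop h).symm
    rw [hdrop]
    simp only [pvUnits, if_neg hbs]
    ring
  | case3 i size h =>
    rw [List.drop_eq_nil_of_le (by omega)]
    simp [pvUnits]

-- the segment-arithmetic loop over pvSplit computes pvUnits
theorem pvUnits_eq_parts (t : List Char) :
    pvUnits t = (((pvSplit [] t).headD []).length : Int) + pvPartsLoop (pvSplit [] t).tail := by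
  have key : ∀ (n : Nat) (t : List Char), t.length ≤ n →
      pvUnits t = (((pvSplit [] t).headD []).length : Int) + pvPartsLoop (pvSplit [] t).tail := by
    intro n
    induction n with
    | zero =>
      intro t ht
      have : t = [] := List.eq_nil_of_length_eq_zero (by omega)
      subst this
      simp [pvUnits, pvSplit, pvPartsLoop]
    | succ n ih =>
      intro t ht
      match t with
      | [] => simp [pvUnits, pvSplit, pvPartsLoop]
      | c :: rest =>
        by_cases hc : c = '\\'
        · -- escape: first segment is empty
          subst hc
          have hu : pvUnits ('\\' :: rest) = 1 + pvUnits rest.tail := by simp [pvUnits]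
          have hs : pvSplit [] ('\\' :: rest) = [] :: pvSplit [] rest := by simp [pvSplit]
          rw [hu, hs]
          simp only [List.headD_cons, List.tail_cons, List.length_nil, Nat.cast_zero, zero_add]
          -- ⊢ 1 + pvUnits rest.tail = pvPartsLoop (pvSplit [] rest)
          match rest with
          | [] => simp [pvSplit, pvPartsLoop, pvUnits]
          | d :: r2 =>
            obtain ⟨h2, tl2, hsp⟩ := List.exists_cons_of_ne_nil (pvSplit_ne_nil [] r2)
            have ihr2 := ih r2 (by simp at ht; omega)
            rw [hsp] at ihr2
            simp only [List.headD_cons, List.tail_cons] at ihr2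
            simp only [List.tail_cons]
            by_cases hd : d = '\\'
            · -- escaped backslash: empty segment, then the next segment is plain text
              subst hd
              have h1 : pvSplit [] ('\\' :: r2) = [] :: h2 :: tl2 := by simp [pvSplit, hsp]
              have h2' : pvPartsLoop ([] :: h2 :: tl2) = (1 + (h2.length : Int)) + pvPartsLoop tl2 := by
                simp [pvPartsLoop]
              rw [h1, h2', ihr2]
              ring
            · -- escaped ordinary char: it heads a nonempty segment
              have h1 : pvSplit [] (d :: r2) = (d :: h2) :: tl2 := by
                simp only [pvSplit, if_neg hd, List.nil_append]
                rw [pvSplit_modifyHead r2 [d], hsp]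
                simp
              have h2' : pvPartsLoop ((d :: h2) :: tl2) = max ((d :: h2).length : Int) 1 + pvPartsLoop tl2 := by
                simp [pvPartsLoop]
              rw [h1, h2', ihr2]
              push_cast [List.length_cons]
              omega
        · -- ordinary char joins the first segment
          obtain ⟨h2, tl2, hsp⟩ := List.exists_cons_of_ne_nil (pvSplit_ne_nil [] rest)
          have ihr := ih rest (by simp at ht; omega)
          rw [hsp] at ihr
          simp only [List.headD_cons, List.tail_cons] at ihr
          have hu : pvUnits (c :: rest) = 1 + pvUnits rest := by simp [pvUnits, hc]
          have h1 : pvSplit [] (c :: rest) = (c :: h2) :: tl2 := by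
            simp only [pvSplit, if_neg hc, List.nil_append]
            rw [pvSplit_modifyHead rest [c], hsp]
            simp
          rw [hu, h1, ihr]
          simp only [List.headD_cons, List.tail_cons]
          push_cast [List.length_cons]
          ring
  exact key t.length t le_rfl

-- ===== VERDICT (by name: the statement is the Claim_ definition above) =====
theorem calculate_string_size_spec : Claim_equal_calculate_string_size := by
  intro argument _
  unfold Spec_calculate_string_size
  simp only [calculate_string_size, calculate_string_size_alt]
  rw [pvSplitOn_eq, pvALoop_eq_units, List.drop_zero, pvUnits_eq_parts]
  ring
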